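-- pv_equiv track=rewrite | github.com/saxster/DJANGO5-master | apps/scheduler/services/dst_validator.py | _assess_risk_level
-- ===== SOURCE A (Python) =====
-- from typing import List, Dict, Optional, Any, Tuple
--
-- def _assess_risk_level(risky_hours: List[int]) -> str:
--     """Assess risk level based on risky hours"""
--     if not risky_hours:
--         return 'none'
--
--     # Hour 2 is highest risk (center of DST transition)
--     if 2 in risky_hours:
--         return 'high'
--
--     # Hours 1 or 3 are medium risk (adjacent to transition)
--     if any(h in [1, 3] for h in risky_hours):
--         return 'medium'
--
--     return 'low'
-- ===== SOURCE B (Python) =====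
-- from typing import List
--
--
-- def _assess_risk_level(risky_hours: List[int]) -> str:
--     """Assess risk level based on risky hours"""
--     level = 0
--     for h in risky_hours:
--         if h == 2:
--             s = 3
--         elif h in (1, 3):
--             s = 2
--         else:
--             s = 1
--         if s > level:
--             level = s
--     return 'none' if level == 0 else 'low' if level == 1 else 'medium' if level == 2 else 'high'
-- ===== Notes on version B (the rewrite author's own statement) =====
-- stated objective: alternative
-- what changed: Replaces the cascade of priority-ordered membership guards (each scanning the list) with a single pass that keeps a running maximum severity (2->3, 1/3->2, other->1) and translates the final maximum to a label.
import Mathlib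
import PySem

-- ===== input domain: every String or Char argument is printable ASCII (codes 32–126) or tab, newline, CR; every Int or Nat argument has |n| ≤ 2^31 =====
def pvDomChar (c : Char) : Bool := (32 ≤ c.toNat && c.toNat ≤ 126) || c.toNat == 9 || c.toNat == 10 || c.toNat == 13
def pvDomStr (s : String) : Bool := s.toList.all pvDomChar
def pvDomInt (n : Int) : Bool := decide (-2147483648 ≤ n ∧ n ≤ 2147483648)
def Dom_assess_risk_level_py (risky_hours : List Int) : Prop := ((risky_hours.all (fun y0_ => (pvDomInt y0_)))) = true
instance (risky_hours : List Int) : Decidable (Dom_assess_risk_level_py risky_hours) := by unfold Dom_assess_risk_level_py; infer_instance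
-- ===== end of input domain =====

-- ===== PORT A =====
-- B replaces A's cascade of membership guards by a single running-maximum pass; same results (alternative decomposition).
def assess_risk_level_py (risky_hours : List Int) : String :=
  if risky_hours = [] then "none"
  else if (2 : Int) ∈ risky_hours then "high"
  else if risky_hours.any (fun h => h ∈ ([1, 3] : List Int)) then "medium"
  else "low"

-- ===== PORT B =====
def pvSev (h : Int) : Int := if h = 2 then 3 else if h = 1 ∨ h = 3 then 2 else 1

def assess_risk_level_py_alt (risky_hours : List Int) : String :=
  let level := risky_hours.foldl (fun acc h =>
    let s := pvSev h
    if s > acc then s else acc) 0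
  if level = 0 then "none" else if level = 1 then "low"
  else if level = 2 then "medium" else "high"

-- ===== PRECONDITION & SPEC =====
def Spec_assess_risk_level_py (risky_hours : List Int) (out : String) : Prop := out = assess_risk_level_py_alt risky_hours
instance (risky_hours : List Int) (out : String) : Decidable (Spec_assess_risk_level_py risky_hours out) := by unfold Spec_assess_risk_level_py; infer_instance

-- ===== CLAIM (what is proved, stated in full; the proofs are below) =====
def Claim_equal_assess_risk_level_py : Prop := ∀ (risky_hours : List Int), Dom_assess_risk_level_py risky_hours → Spec_assess_risk_level_py risky_hours (assess_risk_level_py risky_hours)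

-- ===== LEMMAS AND PROOFS =====

-- the loop body of B's fold
def pvStep (acc h : Int) : Int := if pvSev h > acc then pvSev h else acc

lemma pvStep_eq_max (acc h : Int) : pvStep acc h = max acc (pvSev h) := by
  unfold pvStep; split_ifs with hgt <;> omega

lemma fold_ge_init (l : List Int) (a : Int) : a ≤ l.foldl pvStep a := by
  induction l generalizing a with
  | nil => simp
  | cons x xs ih =>
      simp only [List.foldl_cons]
      calc a ≤ pvStep a x := by rw [pvStep_eq_max]; exact le_max_left _ _
        _ ≤ xs.foldl pvStep (pvStep a x) := ih _

lemma fold_ge_mem (l : List Int) (a h : Int) (hm : h ∈ l) : pvSev h ≤ l.foldl pvStep a := by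
  induction l generalizing a with
  | nil => cases hm
  | cons x xs ih =>
      simp only [List.foldl_cons]
      rcases List.mem_cons.mp hm with rfl | hx
      · calc pvSev h ≤ pvStep a h := by rw [pvStep_eq_max]; exact le_max_right _ _
          _ ≤ xs.foldl pvStep (pvStep a h) := fold_ge_init _ _
      · exact ih _ hx

lemma fold_le (l : List Int) (a b : Int) (ha : a ≤ b) (hb : ∀ h ∈ l, pvSev h ≤ b) :
    l.foldl pvStep a ≤ b := by
  induction l generalizing a with
  | nil => simpa using ha
  | cons x xs ih =>
      simp only [List.foldl_cons]
      refine ih _ ?_ (fun h hm => hb h (List.mem_cons_of_mem _ hm))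
      rw [pvStep_eq_max]
      exact max_le ha (hb x (List.mem_cons_self))

lemma pvSev_le_three (h : Int) : pvSev h ≤ 3 := by unfold pvSev; split_ifs <;> omega

lemma pvSev_ge_one (h : Int) : 1 ≤ pvSev h := by unfold pvSev; split_ifs <;> omega

lemma alt_eq (l : List Int) :
    assess_risk_level_py_alt l =
      (let level := l.foldl pvStep 0
       if level = 0 then "none" else if level = 1 then "low"
       else if level = 2 then "medium" else "high") := by
  unfold assess_risk_level_py_alt
  congr 1

-- ===== VERDICT (by name: the statement is the Claim_ definition above) =====
theorem assess_risk_level_py_spec : Claim_equal_assess_risk_level_py := by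
  intro l _
  unfold Spec_assess_risk_level_py assess_risk_level_py
  rw [alt_eq]
  by_cases hnil : l = []
  · subst hnil; simp [List.foldl]
  · simp only [hnil, if_false]
    by_cases h2 : (2 : Int) ∈ l
    · have hge : (3 : Int) ≤ l.foldl pvStep 0 := by
        have := fold_ge_mem l 0 2 h2
        simpa [pvSev] using this
      have hle : l.foldl pvStep 0 ≤ 3 :=
        fold_le l 0 3 (by omega) (fun h _ => pvSev_le_three h)
      have : l.foldl pvStep 0 = 3 := le_antisymm hle hge
      simp [h2, this]
    · by_cases h13 : l.any (fun h => h ∈ ([1, 3] : List Int))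
      · obtain ⟨x, hx, hx13⟩ := List.any_eq_true.mp h13
        have hx13' : x = 1 ∨ x = 3 := by simpa using hx13
        have hge : (2 : Int) ≤ l.foldl pvStep 0 := by
          have := fold_ge_mem l 0 x hx
          have hs : pvSev x = 2 := by
            rcases hx13' with rfl | rfl <;> simp [pvSev]
          omega
        have hle : l.foldl pvStep 0 ≤ 2 := by
          refine fold_le l 0 2 (by omega) (fun h hm => ?_)
          have hne2 : h ≠ 2 := fun he => h2 (he ▸ hm)
          unfold pvSev
          split_ifs <;> omega
        have heq : l.foldl pvStep 0 = 2 := le_antisymm hle hge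
        rw [if_neg h2, if_pos h13]
        simp [heq]
      · obtain ⟨x, xs, rfl⟩ := List.exists_cons_of_ne_nil hnil
        have hfalse : ((x :: xs).any fun h => decide (h ∈ ([1, 3] : List Int))) = false := by
          rw [Bool.not_eq_true] at h13; exact h13
        have hno : ∀ h ∈ x :: xs, pvSev h = 1 := by
          intro h hm
          have hne2 : h ≠ 2 := fun he => h2 (he ▸ hm)
          have hne13 : ¬(h = 1 ∨ h = 3) := by
            have := List.any_eq_false.mp hfalse h hm
            simpa using this
          unfold pvSev
          simp [hne2, hne13]
        have hge : (1 : Int) ≤ (x :: xs).foldl pvStep 0 := by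
          have := fold_ge_mem (x :: xs) 0 x (List.mem_cons_self)
          have := pvSev_ge_one x
          omega
        have hle : (x :: xs).foldl pvStep 0 ≤ 1 :=
          fold_le _ 0 1 (by omega) (fun h hm => le_of_eq (hno h hm))
        have heq : (x :: xs).foldl pvStep 0 = 1 := le_antisymm hle hge
        rw [if_neg h2]
        simp [heq]
        simpa using hfalse
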